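-- pv_equiv track=rewrite | github.com/guard1000/Everyday-coding | 190120_카드 게임.py | solution
-- ===== SOURCE A (Python) =====
-- def solution(left, right):
--     n =len(left)
--     score = [[0 for cols in range(n+1)] for rows in range(n+1)]
--     for i in range(1,n+1):
--         for j in range(1,n+1):
--             if left[i-1] > right[j-1]:  # 지금 왼쪽이 더 클때 -> 오른쪽 버릴 수 있음
--                 #이전에서 양쪽 다 버릴때, 왼쪽만 버릴때, 오른쪽만 버릴때 의 경우 중 젤 큰거 고르면 됨.
--                 score[i][j] = max(score[i-1][j-1], score[i-1][j], score[i][j-1]+right[j-1])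
--             else:   #오른쪽이 더 크거나 같을때
--                 score[i][j] = max(score[i - 1][j - 1], score[i - 1][j])  # 이전에서 둘다 버린것과 왼쪽만 버린 것 중에 큰거
--     return score[n][n]
-- ===== SOURCE B (Python) =====
-- def solution(left, right):
--     n = len(left)
--     # Phase 1: backward demand analysis from the goal cell (n, n): collect the
--     # set of DP cells the answer actually depends on, with a worklist stack.
--     needed = set()
--     stack = [(n, n)]
--     while stack:
--         i, j = stack.pop()
--         if i == 0 or j == 0 or (i, j) in needed:
--             continue
--         needed.add((i, j))
--         stack.append((i - 1, j - 1))
--         stack.append((i - 1, j))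
--         if left[i - 1] > right[j - 1]:
--             stack.append((i, j - 1))
--     # Phase 2: evaluate only the needed cells, memoised in a dict keyed by cell;
--     # row-major order is a topological order of the dependencies.
--     memo = {}
--     for i in range(1, n + 1):
--         for j in range(1, n + 1):
--             if (i, j) in needed:
--                 best = max(memo.get((i - 1, j - 1), 0), memo.get((i - 1, j), 0))
--                 if left[i - 1] > right[j - 1]:
--                     best = max(best, memo.get((i, j - 1), 0) + right[j - 1])
--                 memo[(i, j)] = best
--     return memo.get((n, n), 0)
-- ===== Notes on version B (the rewrite author's own statement) =====
-- stated objective: alternative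
-- what changed: Replaces A's bottom-up fill of the full (n+1)x(n+1) table with a demand-driven evaluation: a backward worklist pass from the goal cell first computes the set of DP cells the answer actually depends on, then only those cells are evaluated, memoised in a dict keyed by cell; unneeded cells are never computed.
import Mathlib
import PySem

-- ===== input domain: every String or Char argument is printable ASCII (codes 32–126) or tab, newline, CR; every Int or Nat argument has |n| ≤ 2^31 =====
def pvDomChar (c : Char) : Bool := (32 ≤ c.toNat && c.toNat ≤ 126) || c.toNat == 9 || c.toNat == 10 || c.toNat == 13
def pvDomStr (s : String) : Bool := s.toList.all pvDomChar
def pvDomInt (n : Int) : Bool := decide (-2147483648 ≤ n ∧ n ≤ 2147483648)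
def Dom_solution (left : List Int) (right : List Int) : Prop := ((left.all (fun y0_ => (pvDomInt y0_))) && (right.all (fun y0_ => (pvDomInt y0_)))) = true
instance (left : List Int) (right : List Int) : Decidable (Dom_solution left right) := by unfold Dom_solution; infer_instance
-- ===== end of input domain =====

-- B replaces A's bottom-up fill of the full (n+1)×(n+1) table with demand-driven evaluation:
-- a backward worklist pass collects the cells the answer depends on, then only those are
-- evaluated, memoised in a dict (alternative decomposition; return values equal).

-- ===== PORT A =====
-- Inner-loop body of A (one cell update).  All list indices A uses are in range on every
-- input admitted by Pre_solution, so getD is exact where Python indexing returns.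
def aInner (left right : List Int) (i : Int) (score : List (List Int)) (j : Int) :
    List (List Int) :=
  let prevRow := score.getD (i - 1).toNat []
  let curRow := score.getD i.toNat []
  let v : Int :=
    if left.getD (i - 1).toNat 0 > right.getD (j - 1).toNat 0 then
      max (max (prevRow.getD (j - 1).toNat 0) (prevRow.getD j.toNat 0))
          (curRow.getD (j - 1).toNat 0 + right.getD (j - 1).toNat 0)
    else
      max (prevRow.getD (j - 1).toNat 0) (prevRow.getD j.toNat 0)
  score.set i.toNat (curRow.set j.toNat v)

def solution (left : List Int) (right : List Int) : Int :=
  let n := left.length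
  let score0 : List (List Int) := List.replicate (n + 1) (List.replicate (n + 1) (0 : Int))
  let score :=
    (PySem.List.pyRange 1 ((n : Int) + 1) 1).foldl
      (fun sc i => (PySem.List.pyRange 1 ((n : Int) + 1) 1).foldl (aInner left right i) sc)
      score0
  (score.getD n []).getD n 0

-- ===== PORT B =====
-- Phase 1 of B: the worklist loop collecting the needed cells.  The Python 'while stack'
-- loop is ported with a fuel counter that only makes it total: 3·n²+2 steps always
-- suffice (proved along the measure argument in bDisc_ok below), so fuel never runs out.
def bDisc (left right : List Int) : Nat → PySem.Set (Int × Int) → List (Int × Int) →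
    PySem.Set (Int × Int)
  | 0, needed, _ => needed
  | _ + 1, needed, [] => needed
  | fuel + 1, needed, c :: rest =>
    if c.1 = 0 ∨ c.2 = 0 ∨ PySem.Set.contains needed c then
      bDisc left right fuel needed rest
    else
      let needed' := PySem.Set.add needed c
      let rest' :=
        if left.getD (c.1 - 1).toNat 0 > right.getD (c.2 - 1).toNat 0 then
          (c.1, c.2 - 1) :: (c.1 - 1, c.2) :: (c.1 - 1, c.2 - 1) :: rest
        else
          (c.1 - 1, c.2) :: (c.1 - 1, c.2 - 1) :: rest
      bDisc left right fuel needed' rest'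

-- Phase 2 of B: evaluate one needed cell from its memoised dependencies.
def bStep (left right : List Int) (memo : PySem.Dict (Int × Int) Int) (i j : Int) :
    PySem.Dict (Int × Int) Int :=
  let best := max (memo.getD (i - 1, j - 1) 0) (memo.getD (i - 1, j) 0)
  let best :=
    if left.getD (i - 1).toNat 0 > right.getD (j - 1).toNat 0 then
      max best (memo.getD (i, j - 1) 0 + right.getD (j - 1).toNat 0)
    else best
  memo.insert (i, j) best

def bEval (left right : List Int) (S : PySem.Set (Int × Int)) (n : Nat) :
    PySem.Dict (Int × Int) Int :=
  (PySem.List.pyRange 1 ((n : Int) + 1) 1).foldl (fun m i =>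
    (PySem.List.pyRange 1 ((n : Int) + 1) 1).foldl (fun m j =>
      if PySem.Set.contains S (i, j) then bStep left right m i j else m) m)
    PySem.Dict.empty

def solution_alt (left : List Int) (right : List Int) : Int :=
  let n := left.length
  let S := bDisc left right (3 * (n * n) + 2) PySem.Set.empty [((n : Int), (n : Int))]
  (bEval left right S n).getD ((n : Int), (n : Int)) 0

-- ===== PRECONDITION & SPEC =====
-- A indexes right[j-1] for j = 1..len(left), so it raises IndexError when
-- len(right) < len(left); exactly those inputs are excluded.
def Pre_solution (left : List Int) (right : List Int) : Prop :=
  left.length ≤ right.length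
instance (left : List Int) (right : List Int) : Decidable (Pre_solution left right) := by
  unfold Pre_solution; infer_instance

def pvWitness_solution : List Int × List Int := ([3, 1], [2, 2])

def Spec_solution (left : List Int) (right : List Int) (out : Int) : Prop :=
  out = solution_alt left right
instance (left : List Int) (right : List Int) (out : Int) : Decidable (Spec_solution left right out) := by
  unfold Spec_solution; infer_instance

-- ===== CLAIM (what is proved, stated in full; the proofs are below) =====
def Claim_equal_solution : Prop := ∀ (left : List Int) (right : List Int),
  Dom_solution left right → Pre_solution left right →
  Spec_solution left right (solution left right)

-- ===== LEMMAS AND PROOFS =====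

-- The shared mathematical recurrence: dpG i j = score[i][j] of A.
def dpG (left right : List Int) : Nat → Nat → Int
  | 0, _ => 0
  | _ + 1, 0 => 0
  | i + 1, j + 1 =>
    if left.getD i 0 > right.getD j 0 then
      max (max (dpG left right i j) (dpG left right i (j + 1)))
          (dpG left right (i + 1) j + right.getD j 0)
    else
      max (dpG left right i j) (dpG left right i (j + 1))
  termination_by i j => (i, j)

lemma dpG_zero_right (left right : List Int) (i : Nat) : dpG left right i 0 = 0 := by
  cases i <;> simp [dpG]

def entry (M : List (List Int)) (i j : Nat) : Int := (M.getD i []).getD j 0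

lemma getD_set_eq {α : Type} (l : List α) (i : Nat) (v d : α) (h : i < l.length) :
    (l.set i v).getD i d = v := by
  simp [List.getD, h]

lemma getD_set_ne {α : Type} (l : List α) (i k : Nat) (v d : α) (h : k ≠ i) :
    (l.set i v).getD k d = l.getD k d := by
  simp [List.getD, List.getElem?_set_ne (Ne.symm h)]

-- ---------- A-side: solution = dpG n n ----------

def aRowN (left right : List Int) (k : Nat) (M : List (List Int)) (m : Nat) :
    List (List Int) :=
  (PySem.List.pyRange 1 ((m : Int) + 1) 1).foldl (aInner left right ((k : Int) + 1)) M

lemma aRowN_zero (left right : List Int) (k : Nat) (M : List (List Int)) :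
    aRowN left right k M 0 = M := by
  unfold aRowN
  rw [PySem.List.pyRange_one_eq_nil (by omega)]
  rfl

lemma aRowN_succ (left right : List Int) (k : Nat) (M : List (List Int)) (m : Nat) :
    aRowN left right k M (m + 1)
    = aInner left right ((k : Int) + 1) (aRowN left right k M m) ((m : Int) + 1) := by
  unfold aRowN
  have h : PySem.List.pyRange 1 (((m + 1 : Nat) : Int) + 1) 1
      = PySem.List.pyRange 1 ((m : Int) + 1) 1 ++ [(m : Int) + 1] := by
    push_cast
    exact PySem.List.pyRange_one_succ_right (by omega)
  rw [h, List.foldl_append, List.foldl_cons, List.foldl_nil]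

lemma aRowFill (left right : List Int) (k : Nat) (hk : k < left.length)
    (M : List (List Int))
    (hlen : M.length = left.length + 1)
    (hrow : ∀ r, r ≤ left.length → (M.getD r []).length = left.length + 1)
    (hent : ∀ i j, i ≤ left.length → j ≤ left.length →
      entry M i j = if i ≤ k then dpG left right i j else 0) :
    ∀ m, m ≤ left.length →
      (aRowN left right k M m).length = left.length + 1 ∧
      (∀ r, r ≤ left.length → ((aRowN left right k M m).getD r []).length = left.length + 1) ∧
      (∀ i j, i ≤ left.length → j ≤ left.length →
        entry (aRowN left right k M m) i j =
          if i ≤ k then dpG left right i j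
          else if i = k + 1 ∧ j ≤ m then dpG left right i j else 0) := by
  intro m
  induction m with
  | zero =>
    intro _
    rw [aRowN_zero]
    refine ⟨hlen, hrow, ?_⟩
    intro i j hi hj
    rw [hent i j hi hj]
    split_ifs with h1 h2
    · rfl
    · obtain ⟨hik, hj0⟩ := h2
      subst hik
      interval_cases j
      exact (dpG_zero_right left right (k + 1)).symm
    · rfl
  | succ m ih =>
    intro hm
    obtain ⟨IH1, IH2, IH3⟩ := ih (by omega)
    rw [aRowN_succ]
    have htk : (((k : Int) + 1) - 1).toNat = k := by omega
    have htk1 : ((k : Int) + 1).toNat = k + 1 := by omega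
    have htm : (((m : Int) + 1) - 1).toNat = m := by omega
    have htm1 : ((m : Int) + 1).toNat = m + 1 := by omega
    have hcurlen : ((aRowN left right k M m).getD (k + 1) []).length = left.length + 1 :=
      IH2 (k + 1) (by omega)
    have hek0 : ∀ j, j ≤ left.length →
        ((aRowN left right k M m).getD k []).getD j 0 = dpG left right k j := by
      intro j hj
      have := IH3 k j (by omega) hj
      simpa [entry] using this
    have heck : ((aRowN left right k M m).getD (k + 1) []).getD m 0
        = dpG left right (k + 1) m := by
      have := IH3 (k + 1) m (by omega) (by omega)
      simp only [entry] at this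
      rw [this]
      simp
    have hg : dpG left right (k + 1) (m + 1) =
        if left.getD k 0 > right.getD m 0 then
          max (max (dpG left right k m) (dpG left right k (m + 1)))
              (dpG left right (k + 1) m + right.getD m 0)
        else
          max (dpG left right k m) (dpG left right k (m + 1)) := by
      rw [dpG]
    simp only [aInner, htk, htk1, htm, htm1]
    rw [hek0 m (by omega), hek0 (m + 1) (by omega), heck, ← hg]
    refine ⟨by simp [IH1], ?_, ?_⟩
    · intro r hr
      by_cases hrk : r = k + 1
      · subst hrk
        rw [getD_set_eq _ _ _ _ (by rw [IH1]; omega)]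
        rw [List.length_set]
        exact hcurlen
      · rw [getD_set_ne _ _ _ _ _ hrk]
        exact IH2 r hr
    · intro i j hi hj
      unfold entry
      by_cases hik : i = k + 1
      · subst hik
        rw [getD_set_eq _ _ _ _ (by rw [IH1]; omega)]
        by_cases hjm : j = m + 1
        · subst hjm
          rw [getD_set_eq _ _ _ _ (by rw [hcurlen]; omega)]
          split_ifs with h1
          · omega
          · rfl
          · omega
        · rw [getD_set_ne _ _ _ _ _ hjm]
          have h3 := IH3 (k + 1) j (by omega) hj
          simp only [entry] at h3
          rw [h3]
          have hnk : ¬ (k + 1 ≤ k) := by omega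
          by_cases hjm' : j ≤ m
          · have e1 : (k + 1 = k + 1 ∧ j ≤ m) := ⟨rfl, hjm'⟩
            have e2 : (k + 1 = k + 1 ∧ j ≤ m + 1) := ⟨rfl, by omega⟩
            simp [e1, e2, hnk]
          · have e2 : ¬ j ≤ m + 1 := by omega
            simp [hjm', e2, hnk]
      · rw [getD_set_ne _ _ _ _ _ hik]
        have h3 := IH3 i j hi hj
        simp only [entry] at h3
        rw [h3]
        have e1 : ¬ (i = k + 1 ∧ j ≤ m) := fun h => hik h.1
        have e2 : ¬ (i = k + 1 ∧ j ≤ m + 1) := fun h => hik h.1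
        simp [e1, e2]

def aFoldN (left right : List Int) (K : Nat) : List (List Int) :=
  (PySem.List.pyRange 1 ((K : Int) + 1) 1).foldl
    (fun sc i =>
      (PySem.List.pyRange 1 ((left.length : Int) + 1) 1).foldl (aInner left right i) sc)
    (List.replicate (left.length + 1) (List.replicate (left.length + 1) (0 : Int)))

lemma aFoldN_succ (left right : List Int) (K : Nat) :
    aFoldN left right (K + 1) = aRowN left right K (aFoldN left right K) left.length := by
  unfold aFoldN aRowN
  have h : PySem.List.pyRange 1 (((K + 1 : Nat) : Int) + 1) 1
      = PySem.List.pyRange 1 ((K : Int) + 1) 1 ++ [(K : Int) + 1] := by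
    push_cast
    exact PySem.List.pyRange_one_succ_right (by omega)
  rw [h, List.foldl_append, List.foldl_cons, List.foldl_nil]

lemma aFold (left right : List Int) :
    ∀ K, K ≤ left.length →
      (aFoldN left right K).length = left.length + 1 ∧
      (∀ r, r ≤ left.length → ((aFoldN left right K).getD r []).length = left.length + 1) ∧
      (∀ i j, i ≤ left.length → j ≤ left.length →
        entry (aFoldN left right K) i j = if i ≤ K then dpG left right i j else 0) := by
  intro K
  induction K with
  | zero =>
    intro _
    have h0 : aFoldN left right 0
        = List.replicate (left.length + 1) (List.replicate (left.length + 1) (0 : Int)) := by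
      unfold aFoldN
      rw [show ((0 : Nat) : Int) + 1 = 1 by norm_num,
        PySem.List.pyRange_one_eq_nil (le_refl (1 : Int))]
      rfl
    rw [h0]
    have hrep : ∀ i : Nat, i ≤ left.length →
        (List.replicate (left.length + 1)
          (List.replicate (left.length + 1) (0 : Int))).getD i []
        = List.replicate (left.length + 1) (0 : Int) := by
      intro i hi
      rw [List.getD_eq_getElem _ _ (by simp only [List.length_replicate]; omega)]
      simp
    refine ⟨by simp, ?_, ?_⟩
    · intro r hr
      rw [hrep r hr]
      simp
    · intro i j hi hj
      unfold entry
      rw [hrep i hi, List.getD_eq_getElem _ _ (by simp only [List.length_replicate]; omega)]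
      simp only [List.getElem_replicate]
      split_ifs with h1
      · interval_cases i
        simp [dpG]
      · rfl
  | succ K ih =>
    intro hK
    obtain ⟨IH1, IH2, IH3⟩ := ih (by omega)
    rw [aFoldN_succ]
    obtain ⟨H1, H2, H3⟩ := aRowFill left right K (by omega) (aFoldN left right K)
      IH1 IH2 IH3 left.length le_rfl
    refine ⟨H1, H2, ?_⟩
    intro i j hi hj
    rw [H3 i j hi hj]
    split_ifs <;> first | rfl | omega

lemma solution_eq (left right : List Int) :
    solution left right = dpG left right left.length left.length := by
  have h := aFold left right left.length le_rfl
  have hs : solution left right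
      = entry (aFoldN left right left.length) left.length left.length := rfl
  rw [hs, h.2.2 left.length left.length le_rfl le_rfl]
  simp

-- ---------- B-side: solution_alt = dpG n n ----------

-- Grid membership and the (conditional) dependencies of a cell.
def InGridZ (n : Nat) (c : Int × Int) : Prop :=
  1 ≤ c.1 ∧ c.1 ≤ (n : Int) ∧ 1 ≤ c.2 ∧ c.2 ≤ (n : Int)

def DepIn (left right : List Int) (c : Int × Int) (M : List (Int × Int)) : Prop :=
  ((c.1 - 1, c.2 - 1) ∈ M ∨ c.1 - 1 = 0 ∨ c.2 - 1 = 0) ∧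
  ((c.1 - 1, c.2) ∈ M ∨ c.1 - 1 = 0) ∧
  (left.getD (c.1 - 1).toNat 0 > right.getD (c.2 - 1).toNat 0 →
    ((c.1, c.2 - 1) ∈ M ∨ c.2 - 1 = 0))

lemma length_le_grid (n : Nat) (l : List (Int × Int)) (hnd : l.Nodup)
    (hg : ∀ c ∈ l, InGridZ n c) : l.length ≤ n * n := by
  classical
  have hsub : l.toFinset ⊆ (Finset.Icc (1 : Int) n) ×ˢ (Finset.Icc (1 : Int) n) := by
    intro c hc
    have hcl : c ∈ l := List.mem_toFinset.1 hc
    obtain ⟨h1, h2, h3, h4⟩ := hg c hcl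
    simp [Finset.mem_product, Finset.mem_Icc]
    exact ⟨⟨h1, h2⟩, ⟨h3, h4⟩⟩
  have hcard := Finset.card_le_card hsub
  rw [List.toFinset_card_of_nodup hnd] at hcard
  simpa [Finset.card_product, Int.card_Icc] using hcard

lemma depin_mono (left right : List Int) (c : Int × Int) (M M' : List (Int × Int))
    (hsub : ∀ x ∈ M, x ∈ M') : DepIn left right c M → DepIn left right c M' := by
  intro ⟨h1, h2, h3⟩
  exact ⟨h1.imp_left (hsub _), h2.imp_left (hsub _),
    fun hc => (h3 hc).imp_left (hsub _)⟩

lemma bDisc_ok (left right : List Int) (n : Nat) :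
    ∀ (fuel : Nat) (needed : PySem.Set (Int × Int)) (stack : List (Int × Int)),
    needed.Nodup →
    (∀ c ∈ needed, InGridZ n c) →
    (∀ c ∈ stack, 0 ≤ c.1 ∧ c.1 ≤ (n : Int) ∧ 0 ≤ c.2 ∧ c.2 ≤ (n : Int)) →
    (∀ c ∈ needed, DepIn left right c (needed ++ stack)) →
    stack.length + 3 * (n * n - needed.length) ≤ fuel →
    (∀ c ∈ needed, c ∈ bDisc left right fuel needed stack) ∧
    (∀ c ∈ stack, c ∈ bDisc left right fuel needed stack ∨ c.1 = 0 ∨ c.2 = 0) ∧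
    (∀ c ∈ bDisc left right fuel needed stack, InGridZ n c) ∧
    (∀ c ∈ bDisc left right fuel needed stack,
      DepIn left right c (bDisc left right fuel needed stack)) := by
  intro fuel
  induction fuel with
  | zero =>
    intro needed stack hnd hgrid hsb hdep hmu
    have hst : stack = [] := List.length_eq_zero_iff.1 (by omega)
    subst hst
    simp only [bDisc]
    exact ⟨fun c hc => hc, by simp, hgrid, by simpa using hdep⟩
  | succ fuel ih =>
    intro needed stack hnd hgrid hsb hdep hmu
    rcases stack with _ | ⟨c, rest⟩
    · simp only [bDisc]
      exact ⟨fun c hc => hc, by simp, hgrid, by simpa using hdep⟩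
    · simp only [bDisc]
      by_cases hguard : c.1 = 0 ∨ c.2 = 0 ∨ PySem.Set.contains needed c = true
      · rw [if_pos (by simpa using hguard)]
        -- the popped cell is base or already recorded
        have hck : c ∈ needed ∨ c.1 = 0 ∨ c.2 = 0 := by
          rcases hguard with h | h | h
          · exact Or.inr (Or.inl h)
          · exact Or.inr (Or.inr h)
          · exact Or.inl ((PySem.Set.contains_iff _ _).1 h)
        have hdep' : ∀ c' ∈ needed, DepIn left right c' (needed ++ rest) := by
          intro c' hc'
          obtain ⟨hg1, hg2, hg3, hg4⟩ := hgrid c' hc'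
          obtain ⟨h1, h2, h3⟩ := hdep c' hc'
          refine ⟨?_, ?_, fun hcnd => ?_⟩
          · rcases h1 with h | h
            · rcases List.mem_append.1 h with h | h
              · exact Or.inl (List.mem_append_left _ h)
              · rcases List.mem_cons.1 h with h | h
                · subst h
                  rcases hck with hk | hk | hk
                  · exact Or.inl (List.mem_append_left _ hk)
                  · exact Or.inr (Or.inl (by simpa using hk))
                  · exact Or.inr (Or.inr (by simpa using hk))
                · exact Or.inl (List.mem_append_right _ h)
            · exact Or.inr h
          · rcases h2 with h | h
            · rcases List.mem_append.1 h with h | h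
              · exact Or.inl (List.mem_append_left _ h)
              · rcases List.mem_cons.1 h with h | h
                · subst h
                  rcases hck with hk | hk | hk
                  · exact Or.inl (List.mem_append_left _ hk)
                  · exact Or.inr (by simpa using hk)
                  · exfalso
                    simp at hk
                    omega
                · exact Or.inl (List.mem_append_right _ h)
            · exact Or.inr h
          · rcases h3 hcnd with h | h
            · rcases List.mem_append.1 h with h | h
              · exact Or.inl (List.mem_append_left _ h)
              · rcases List.mem_cons.1 h with h | h
                · subst h
                  rcases hck with hk | hk | hk
                  · exact Or.inl (List.mem_append_left _ hk)
                  · exfalso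
                    simp at hk
                    omega
                  · exact Or.inr (by simpa using hk)
                · exact Or.inl (List.mem_append_right _ h)
            · exact Or.inr h
        obtain ⟨R1, R2, R3, R4⟩ := ih needed rest hnd hgrid
          (fun x hx => hsb x (List.mem_cons_of_mem _ hx)) hdep'
          (by simp at hmu ⊢; omega)
        refine ⟨R1, ?_, R3, R4⟩
        intro x hx
        rcases List.mem_cons.1 hx with hx | hx
        · subst hx
          rcases hck with hk | hk | hk
          · exact Or.inl (R1 _ hk)
          · exact Or.inr (Or.inl hk)
          · exact Or.inr (Or.inr hk)
        · exact R2 x hx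
      · rw [if_neg (by simpa using hguard)]
        simp only [not_or] at hguard
        obtain ⟨hc1, hc2, hnc⟩ := hguard
        have hncf : PySem.Set.contains needed c = false := by
          simpa using hnc
        have hcmem : c ∉ needed := by
          intro h
          rw [(PySem.Set.contains_iff _ _).2 h] at hncf
          exact absurd hncf (by decide)
        have hadd : PySem.Set.add needed c = needed ++ [c] := by
          simp [PySem.Set.add, hcmem]
        obtain ⟨hb1, hb2, hb3, hb4⟩ := hsb c (List.mem_cons_self)
        have hgc : InGridZ n c := ⟨by omega, hb2, by omega, hb4⟩
        have hnd' : (needed ++ [c]).Nodup :=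
          (List.nodup_append).2 ⟨hnd, List.nodup_singleton c, by
            intro a ha b hb
            have hbc : b = c := List.mem_singleton.1 hb
            subst hbc
            intro hac
            exact hcmem (hac ▸ ha)⟩
        have hgrid' : ∀ x ∈ needed ++ [c], InGridZ n x := by
          intro x hx
          rcases List.mem_append.1 hx with hx | hx
          · exact hgrid x hx
          · rw [List.mem_singleton.1 hx]
            exact hgc
        have hlen1 : (needed ++ [c]).length ≤ n * n :=
          length_le_grid n _ hnd' hgrid'
        by_cases hcnd : left.getD (c.1 - 1).toNat 0 > right.getD (c.2 - 1).toNat 0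
        · rw [if_pos hcnd, hadd]
          have hsb' : ∀ x ∈ (c.1, c.2 - 1) :: (c.1 - 1, c.2) :: (c.1 - 1, c.2 - 1) :: rest,
              0 ≤ x.1 ∧ x.1 ≤ (n : Int) ∧ 0 ≤ x.2 ∧ x.2 ≤ (n : Int) := by
            intro x hx
            rcases List.mem_cons.1 hx with hx | hx
            · subst hx; constructor <;> simp <;> omega
            rcases List.mem_cons.1 hx with hx | hx
            · subst hx; constructor <;> simp <;> omega
            rcases List.mem_cons.1 hx with hx | hx
            · subst hx; constructor <;> simp <;> omega
            · exact hsb x (List.mem_cons_of_mem _ hx)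
          have hdep' : ∀ c' ∈ needed ++ [c],
              DepIn left right c' ((needed ++ [c]) ++ ((c.1, c.2 - 1) :: (c.1 - 1, c.2) :: (c.1 - 1, c.2 - 1) :: rest)) := by
            intro c' hc'
            rcases List.mem_append.1 hc' with hc' | hc'
            · refine depin_mono left right c' _ _ ?_ (hdep c' hc')
              intro x hx
              rcases List.mem_append.1 hx with hx | hx
              · exact List.mem_append_left _ (List.mem_append_left _ hx)
              · rcases List.mem_cons.1 hx with hx | hx
                · subst hx
                  exact List.mem_append_left _ (List.mem_append_right _ (by simp))
                · exact List.mem_append_right _ (by simp [hx])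
            · rw [List.mem_singleton.1 hc']
              exact ⟨Or.inl (List.mem_append_right _ (by simp)),
                Or.inl (List.mem_append_right _ (by simp)),
                fun _ => Or.inl (List.mem_append_right _ (by simp))⟩
          obtain ⟨R1, R2, R3, R4⟩ := ih (needed ++ [c]) _ hnd' hgrid' hsb' hdep'
            (by simp at hmu hlen1 ⊢; omega)
          refine ⟨fun x hx => R1 x (List.mem_append_left _ hx), ?_, R3, R4⟩
          intro x hx
          rcases List.mem_cons.1 hx with hx | hx
          · subst hx
            exact Or.inl (R1 _ (List.mem_append_right _ (by simp)))
          · exact R2 x (by simp [hx])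
        · rw [if_neg hcnd, hadd]
          have hsb' : ∀ x ∈ (c.1 - 1, c.2) :: (c.1 - 1, c.2 - 1) :: rest,
              0 ≤ x.1 ∧ x.1 ≤ (n : Int) ∧ 0 ≤ x.2 ∧ x.2 ≤ (n : Int) := by
            intro x hx
            rcases List.mem_cons.1 hx with hx | hx
            · subst hx; constructor <;> simp <;> omega
            rcases List.mem_cons.1 hx with hx | hx
            · subst hx; constructor <;> simp <;> omega
            · exact hsb x (List.mem_cons_of_mem _ hx)
          have hdep' : ∀ c' ∈ needed ++ [c],
              DepIn left right c' ((needed ++ [c]) ++ ((c.1 - 1, c.2) :: (c.1 - 1, c.2 - 1) :: rest)) := by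
            intro c' hc'
            rcases List.mem_append.1 hc' with hc' | hc'
            · refine depin_mono left right c' _ _ ?_ (hdep c' hc')
              intro x hx
              rcases List.mem_append.1 hx with hx | hx
              · exact List.mem_append_left _ (List.mem_append_left _ hx)
              · rcases List.mem_cons.1 hx with hx | hx
                · subst hx
                  exact List.mem_append_left _ (List.mem_append_right _ (by simp))
                · exact List.mem_append_right _ (by simp [hx])
            · rw [List.mem_singleton.1 hc']
              exact ⟨Or.inl (List.mem_append_right _ (by simp)),
                Or.inl (List.mem_append_right _ (by simp)),
                fun hcd => absurd hcd hcnd⟩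
          obtain ⟨R1, R2, R3, R4⟩ := ih (needed ++ [c]) _ hnd' hgrid' hsb' hdep'
            (by simp at hmu hlen1 ⊢; omega)
          refine ⟨fun x hx => R1 x (List.mem_append_left _ hx), ?_, R3, R4⟩
          intro x hx
          rcases List.mem_cons.1 hx with hx | hx
          · subst hx
            exact Or.inl (R1 _ (List.mem_append_right _ (by simp)))
          · exact R2 x (by simp [hx])

lemma bDisc_start (left right : List Int) :
    let n := left.length
    let S := bDisc left right (3 * (n * n) + 2) PySem.Set.empty [((n : Int), (n : Int))]
    (((n : Int), (n : Int)) ∈ S ∨ n = 0) ∧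
    (∀ c ∈ S, InGridZ n c) ∧ (∀ c ∈ S, DepIn left right c S) := by
  intro n S
  obtain ⟨R1, R2, R3, R4⟩ := bDisc_ok left right n (3 * (n * n) + 2) PySem.Set.empty
    [((n : Int), (n : Int))] List.nodup_nil (by simp [PySem.Set.empty])
    (by
      intro c hc
      rw [List.mem_singleton.1 hc]
      refine ⟨by omega, le_rfl, by omega, le_rfl⟩)
    (by simp [PySem.Set.empty]) (by simp; omega)
  refine ⟨?_, R3, R4⟩
  rcases R2 _ (List.mem_singleton_self _) with h | h | h
  · exact Or.inl h
  · exact Or.inr (by simp at h; exact_mod_cast h)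
  · exact Or.inr (by simp at h; exact_mod_cast h)

-- Phase-2 invariant: after processing rows ≤ K fully and row K+1 up to column m,
-- the memo holds exactly the processed needed cells, with the dpG values.
def MemoInv (left right : List Int) (S : List (Int × Int))
    (memo : PySem.Dict (Int × Int) Int) (K m : Nat) : Prop :=
  ∀ a b : Int, memo.get? (a, b) =
    if (a, b) ∈ S ∧ (a ≤ (K : Int) ∨ (a = (K : Int) + 1 ∧ b ≤ (m : Int))) then
      some (dpG left right a.toNat b.toNat)
    else none

def bRowN (left right : List Int) (S : PySem.Set (Int × Int)) (K : Nat)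
    (memo : PySem.Dict (Int × Int) Int) (m : Nat) : PySem.Dict (Int × Int) Int :=
  (PySem.List.pyRange 1 ((m : Int) + 1) 1).foldl
    (fun d j => if PySem.Set.contains S (((K : Int) + 1), j) then
        bStep left right d ((K : Int) + 1) j else d) memo

lemma bRowN_zero (left right : List Int) (S : PySem.Set (Int × Int)) (K : Nat)
    (memo : PySem.Dict (Int × Int) Int) : bRowN left right S K memo 0 = memo := by
  unfold bRowN
  rw [PySem.List.pyRange_one_eq_nil (by omega)]
  rfl

lemma bRowN_succ (left right : List Int) (S : PySem.Set (Int × Int)) (K : Nat)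
    (memo : PySem.Dict (Int × Int) Int) (m : Nat) :
    bRowN left right S K memo (m + 1)
    = (if PySem.Set.contains S (((K : Int) + 1), ((m : Int) + 1)) then
        bStep left right (bRowN left right S K memo m) ((K : Int) + 1) ((m : Int) + 1)
      else bRowN left right S K memo m) := by
  unfold bRowN
  have h : PySem.List.pyRange 1 (((m + 1 : Nat) : Int) + 1) 1
      = PySem.List.pyRange 1 ((m : Int) + 1) 1 ++ [(m : Int) + 1] := by
    push_cast
    exact PySem.List.pyRange_one_succ_right (by omega)
  rw [h, List.foldl_append, List.foldl_cons, List.foldl_nil]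

-- Read one memoised dependency: a processed needed cell yields its dpG value,
-- an unneeded cell must be a base cell of the recurrence, whose value is 0.
lemma memo_getD (left right : List Int) (S : List (Int × Int))
    (memo : PySem.Dict (Int × Int) Int) (K m : Nat)
    (hInv : MemoInv left right S memo K m) (a b : Int)
    (hst : a ≤ (K : Int) ∨ (a = (K : Int) + 1 ∧ b ≤ (m : Int)))
    (hbase : (a, b) ∉ S → dpG left right a.toNat b.toNat = 0) :
    memo.getD (a, b) 0 = dpG left right a.toNat b.toNat := by
  rw [PySem.Dict.getD_eq_get?_getD, hInv a b]
  by_cases hS : (a, b) ∈ S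
  · simp [hS, hst]
  · simp [hS, hbase hS]

lemma bRow_inv (left right : List Int) (S : PySem.Set (Int × Int))
    (hcl : ∀ c ∈ S, DepIn left right c S)
    (K : Nat) (memo : PySem.Dict (Int × Int) Int)
    (h0 : MemoInv left right S memo K 0) :
    ∀ m, MemoInv left right S (bRowN left right S K memo m) K m := by
  intro m
  induction m with
  | zero => rw [bRowN_zero]; exact h0
  | succ m ih =>
    rw [bRowN_succ]
    by_cases hc : PySem.Set.contains S (((K : Int) + 1), ((m : Int) + 1)) = true
    · rw [if_pos hc]
      have hS : (((K : Int) + 1), ((m : Int) + 1)) ∈ S := (PySem.Set.contains_iff _ _).1 hc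
      obtain ⟨hd1, hd2, hd3⟩ := hcl _ hS
      simp only at hd1 hd2 hd3
      have e1 : ((K : Int) + 1 - 1) = (K : Int) := by omega
      have e2 : ((m : Int) + 1 - 1) = (m : Int) := by omega
      have tK : ((K : Int)).toNat = K := by omega
      have tm : ((m : Int)).toNat = m := by omega
      have tK1 : ((K : Int) + 1).toNat = K + 1 := by omega
      have tm1 : ((m : Int) + 1).toNat = m + 1 := by omega
      simp only [e1, e2] at hd1 hd2 hd3
      -- values of the three dependencies
      have v1 : (bRowN left right S K memo m).getD ((K : Int), (m : Int)) 0
          = dpG left right K m := by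
        have := memo_getD left right S _ K m (ih) (K : Int) (m : Int) (Or.inl le_rfl)
          (fun hnot => by
            rcases hd1 with h | h | h
            · exact absurd h hnot
            · have : K = 0 := by omega
              subst this; simp [dpG]
            · have : m = 0 := by omega
              subst this; rw [tK]; exact dpG_zero_right left right K)
        rw [this, tK, tm]
      have v2 : (bRowN left right S K memo m).getD ((K : Int), (m : Int) + 1) 0
          = dpG left right K (m + 1) := by
        have := memo_getD left right S _ K m (ih) (K : Int) ((m : Int) + 1) (Or.inl le_rfl)
          (fun hnot => by
            rcases hd2 with h | h
            · exact absurd h hnot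
            · have : K = 0 := by omega
              subst this; simp [dpG])
        rw [this, tK, tm1]
      have v3 : left.getD K 0 > right.getD m 0 →
          (bRowN left right S K memo m).getD ((K : Int) + 1, (m : Int)) 0
          = dpG left right (K + 1) m := by
        intro hcond
        have hd3' := hd3 (by rw [tK, tm]; exact hcond)
        have := memo_getD left right S _ K m (ih) ((K : Int) + 1) (m : Int)
          (Or.inr ⟨rfl, le_rfl⟩)
          (fun hnot => by
            rcases hd3' with h | h
            · exact absurd h hnot
            · have : m = 0 := by omega
              subst this; rw [tK1]; exact dpG_zero_right left right (K + 1))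
        rw [this, tK1, tm]
      -- the inserted value is dpG (K+1) (m+1)
      have hval : bStep left right (bRowN left right S K memo m) ((K : Int) + 1) ((m : Int) + 1)
          = (bRowN left right S K memo m).insert (((K : Int) + 1), ((m : Int) + 1))
              (dpG left right (K + 1) (m + 1)) := by
        unfold bStep
        rw [e1, e2, tK, tm]
        have hg1 : dpG left right (K + 1) (m + 1) =
            if left.getD K 0 > right.getD m 0 then
              max (max (dpG left right K m) (dpG left right K (m + 1)))
                  (dpG left right (K + 1) m + right.getD m 0)
            else
              max (dpG left right K m) (dpG left right K (m + 1)) := by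
          rw [dpG]
        rw [v1, v2, hg1]
        by_cases hcond : left.getD K 0 > right.getD m 0
        · simp only [hcond, if_true, v3 hcond]
        · simp only [hcond, if_false]
      rw [hval]
      intro a b
      rw [PySem.Dict.get?_insert]
      by_cases heq : ((a : Int), (b : Int)) = (((K : Int) + 1), ((m : Int) + 1))
      · rw [if_pos heq]
        obtain ⟨ha, hb⟩ := Prod.mk.injEq .. ▸ heq
        have hsa : a.toNat = K + 1 := by omega
        have hsb : b.toNat = m + 1 := by omega
        rw [if_pos ⟨by rw [ha, hb]; exact hS, Or.inr ⟨ha, by omega⟩⟩, hsa, hsb]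
      · rw [if_neg heq, ih a b]
        by_cases hS' : (a, b) ∈ S
        · simp only [hS', true_and]
          have hne : ¬ (a = (K : Int) + 1 ∧ b = (m : Int) + 1) := by
            intro ⟨h1, h2⟩; exact heq (by rw [h1, h2])
          by_cases h1 : a ≤ (K : Int)
          · simp [h1]
          · simp only [h1, false_or]
            by_cases h2 : a = (K : Int) + 1
            · have : (b ≤ (m : Int)) ↔ (b ≤ (m : Int) + 1) := by
                constructor
                · omega
                · intro hb
                  rcases lt_or_eq_of_le hb with h | h
                  · omega
                  · exact absurd ⟨h2, h⟩ hne
              simp [this]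
            · simp [h2]
        · simp [hS']
    · rw [if_neg hc]
      have hS : (((K : Int) + 1), ((m : Int) + 1)) ∉ S := by
        intro h
        exact hc ((PySem.Set.contains_iff _ _).2 h)
      intro a b
      rw [ih a b]
      by_cases hS' : (a, b) ∈ S
      · simp only [hS', true_and]
        have hne : ¬ (a = (K : Int) + 1 ∧ b = (m : Int) + 1) := by
          intro ⟨h1, h2⟩
          rw [h1, h2] at hS'
          exact hS hS'
        by_cases h1 : a ≤ (K : Int)
        · simp [h1]
        · simp only [h1, false_or]
          by_cases h2 : a = (K : Int) + 1
          · have : (b ≤ (m : Int)) ↔ (b ≤ (m : Int) + 1) := by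
              constructor
              · omega
              · intro hb
                rcases lt_or_eq_of_le hb with h | h
                · omega
                · exact absurd ⟨h2, h⟩ hne
            simp [this]
          · simp [h2]
      · simp [hS']

lemma MemoInv_shift (left right : List Int) (S : List (Int × Int)) (n : Nat)
    (hg : ∀ c ∈ S, InGridZ n c) (memo : PySem.Dict (Int × Int) Int) (K : Nat)
    (h : MemoInv left right S memo K n) : MemoInv left right S memo (K + 1) 0 := by
  intro a b
  rw [h a b]
  by_cases hS : (a, b) ∈ S
  · obtain ⟨h1, h2, h3, h4⟩ := hg _ hS
    simp only [hS, true_and]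
    have h2' : a ≤ (n : Int) := h2
    have h3' : 1 ≤ b := h3
    have hiff : (a ≤ (K : Int) ∨ (a = (K : Int) + 1 ∧ b ≤ (n : Int)))
        ↔ (a ≤ ((K + 1 : Nat) : Int) ∨ (a = ((K + 1 : Nat) : Int) + 1 ∧ b ≤ ((0 : Nat) : Int))) := by
      push_cast
      push_cast at h2' h3'
      omega
    exact if_congr hiff rfl rfl
  · simp [hS]

lemma bEval_inv (left right : List Int) (S : PySem.Set (Int × Int)) (n : Nat)
    (hg : ∀ c ∈ S, InGridZ n c) (hcl : ∀ c ∈ S, DepIn left right c S) :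
    ∀ (K : Nat), MemoInv left right S
      ((PySem.List.pyRange 1 ((K : Int) + 1) 1).foldl (fun m i =>
        (PySem.List.pyRange 1 ((n : Int) + 1) 1).foldl (fun m j =>
          if PySem.Set.contains S (i, j) then bStep left right m i j else m) m)
        PySem.Dict.empty) K 0 := by
  intro K
  induction K with
  | zero =>
    rw [show ((0 : Nat) : Int) + 1 = 1 by norm_num,
      PySem.List.pyRange_one_eq_nil (le_refl (1 : Int))]
    intro a b
    rw [List.foldl_nil, PySem.Dict.get?_empty]
    by_cases hS : (a, b) ∈ S
    · obtain ⟨h1, _, h3, _⟩ := hg _ hS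
      have h1' : 1 ≤ a := h1
      have h3' : 1 ≤ b := h3
      rw [if_neg]
      intro ⟨_, hor⟩
      push_cast at hor
      omega
    · rw [if_neg]
      intro ⟨hmem, _⟩
      exact hS hmem
  | succ K ih =>
    have h : PySem.List.pyRange 1 (((K + 1 : Nat) : Int) + 1) 1
        = PySem.List.pyRange 1 ((K : Int) + 1) 1 ++ [(K : Int) + 1] := by
      push_cast
      exact PySem.List.pyRange_one_succ_right (by omega)
    rw [h, List.foldl_append, List.foldl_cons, List.foldl_nil]
    exact MemoInv_shift left right S n hg _ K
      (bRow_inv left right S hcl K _ ih n)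

lemma solution_alt_eq (left right : List Int) :
    solution_alt left right = dpG left right left.length left.length := by
  obtain ⟨hnn, hg, hcl⟩ := bDisc_start left right
  have hInv := bEval_inv left right
    (bDisc left right (3 * (left.length * left.length) + 2) PySem.Set.empty
      [((left.length : Int), (left.length : Int))]) left.length hg hcl left.length
  show ((PySem.List.pyRange 1 ((left.length : Int) + 1) 1).foldl _ PySem.Dict.empty).getD
      ((left.length : Int), (left.length : Int)) 0 = _
  rw [PySem.Dict.getD_eq_get?_getD, hInv (left.length : Int) (left.length : Int)]
  by_cases hn : left.length = 0
  · have hnotin : ((left.length : Int), (left.length : Int)) ∉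
        bDisc left right (3 * (left.length * left.length) + 2) PySem.Set.empty
          [((left.length : Int), (left.length : Int))] := by
      intro h
      obtain ⟨h1, _, _, _⟩ := hg _ h
      omega
    rw [hn]
    rw [hn] at hnotin
    simp only [hnotin, false_and, if_false, Option.getD_none]
    simp [dpG]
  · have hS := hnn.resolve_right hn
    have hst : ((left.length : Int) ≤ (left.length : Int) ∨
        ((left.length : Int) = (left.length : Int) + 1 ∧ (left.length : Int) ≤ ((0 : Nat) : Int))) :=
      Or.inl le_rfl
    rw [if_pos ⟨hS, hst⟩]
    simp

-- ===== VERDICT =====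
theorem solution_spec : Claim_equal_solution := by
  intro left right _ hpre
  unfold Spec_solution
  rw [solution_eq, solution_alt_eq]
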